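-- pv_equiv track=rewrite | github.com/briansu2004/MyHackerRank | Python/Append-and-Delete/app_fromfile.py | appendAndDelete
-- ===== SOURCE A (Python) =====
-- def appendAndDelete(s, t, k):
--     # Write your code here
--     c = 0
--     l = len(s)
--     while s[:l] != t[:l]:
--         l -= 1
--         c += 1
--     o = len(t) -l + c
--     if k < o:
--         return("No")
--     elif len(s) + len(t) <= k:
--         return("Yes")
--     elif 2 * len(t) < k:
--         return("Yes")
--     elif k % 2 == o % 2:
--         return("Yes")
--     else:
--         return("No")
-- ===== SOURCE B (Python) =====
-- def appendAndDelete(s, t, k):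
--     # single forward pass computing the common-prefix length, then the same arithmetic
--     p = 0
--     while p < len(s) and p < len(t) and s[p] == t[p]:
--         p += 1
--     o = len(s) + len(t) - 2 * p
--     if k < o:
--         return "No"
--     elif len(s) + len(t) <= k:
--         return "Yes"
--     elif 2 * len(t) < k:
--         return "Yes"
--     elif k % 2 == o % 2:
--         return "Yes"
--     else:
--         return "No"
-- ===== Notes on version B (the rewrite author's own statement) =====
-- stated objective: faster
-- what changed: A repeatedly compares shrinking slices s[:l] != t[:l] (O(n) comparison per iteration, O(n^2) total); B computes the common-prefix length in one forward character scan and then applies the same arithmetic/branching.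
import Mathlib
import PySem

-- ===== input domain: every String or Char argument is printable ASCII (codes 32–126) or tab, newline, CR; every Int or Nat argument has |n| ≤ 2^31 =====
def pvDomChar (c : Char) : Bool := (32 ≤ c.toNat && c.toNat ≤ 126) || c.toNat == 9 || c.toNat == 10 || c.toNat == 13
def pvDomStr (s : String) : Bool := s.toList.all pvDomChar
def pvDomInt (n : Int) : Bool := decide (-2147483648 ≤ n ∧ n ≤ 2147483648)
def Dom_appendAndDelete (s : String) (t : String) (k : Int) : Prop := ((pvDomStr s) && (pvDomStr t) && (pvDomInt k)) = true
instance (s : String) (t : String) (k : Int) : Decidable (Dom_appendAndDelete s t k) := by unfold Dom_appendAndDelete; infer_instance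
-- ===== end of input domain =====

-- B replaces A's quadratic shrinking-slice comparison loop by a single forward
-- common-prefix scan; the arithmetic and branching after the loop are unchanged.

-- ===== PORT A =====
-- the while loop: `while s[:l] != t[:l]: l -= 1; c += 1`; at l = 0 the slices are
-- both empty so the condition is false and the loop returns (0, c).
def adLoopA (s t : List Char) : Nat → Int → Nat × Int
  | 0, c => (0, c)
  | l + 1, c =>
      if PySem.List.slice s none (some ((l + 1 : Nat) : Int)) ≠
         PySem.List.slice t none (some ((l + 1 : Nat) : Int)) then
        adLoopA s t l (c + 1)
      else (l + 1, c)

def appendAndDelete (s : String) (t : String) (k : Int) : String :=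
  let sl := s.toList
  let tl := t.toList
  let lc := adLoopA sl tl sl.length 0
  let l := lc.1
  let c := lc.2
  let o : Int := (tl.length : Int) - (l : Int) + c
  if k < o then "No"
  else if (sl.length : Int) + (tl.length : Int) ≤ k then "Yes"
  else if 2 * (tl.length : Int) < k then "Yes"
  else if PySem.Int.mod k 2 = PySem.Int.mod o 2 then "Yes"
  else "No"

-- ===== PORT B =====
-- `while p < len(s) and p < len(t) and s[p] == t[p]: p += 1` as structural recursion
def lcpLen : List Char → List Char → Nat
  | a :: as, b :: bs => if a = b then lcpLen as bs + 1 else 0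
  | _, _ => 0

def appendAndDelete_alt (s : String) (t : String) (k : Int) : String :=
  let sl := s.toList
  let tl := t.toList
  let p := lcpLen sl tl
  let o : Int := (sl.length : Int) + (tl.length : Int) - 2 * (p : Int)
  if k < o then "No"
  else if (sl.length : Int) + (tl.length : Int) ≤ k then "Yes"
  else if 2 * (tl.length : Int) < k then "Yes"
  else if PySem.Int.mod k 2 = PySem.Int.mod o 2 then "Yes"
  else "No"

-- ===== PRECONDITION & SPEC =====
def Spec_appendAndDelete (s : String) (t : String) (k : Int) (out : String) : Prop := out = appendAndDelete_alt s t k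
instance (s : String) (t : String) (k : Int) (out : String) : Decidable (Spec_appendAndDelete s t k out) := by unfold Spec_appendAndDelete; infer_instance

-- ===== CLAIM (what is proved, stated in full; the proofs are below) =====
def Claim_equal_appendAndDelete : Prop := ∀ (s : String) (t : String) (k : Int), Dom_appendAndDelete s t k → Spec_appendAndDelete s t k (appendAndDelete s t k)

-- ===== LEMMAS AND PROOFS =====

theorem lcpLen_le_left (s t : List Char) : lcpLen s t ≤ s.length := by
  induction s generalizing t with
  | nil => cases t <;> simp [lcpLen]
  | cons a as ih =>
      cases t with
      | nil => simp [lcpLen]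
      | cons b bs =>
          simp only [lcpLen, List.length_cons]
          split
          · exact Nat.succ_le_succ (ih bs)
          · omega

theorem take_eq_take_iff (s t : List Char) (l : Nat) (hl : l ≤ s.length) :
    s.take l = t.take l ↔ l ≤ lcpLen s t := by
  induction l generalizing s t with
  | zero => simp
  | succ l ih =>
      cases s with
      | nil => simp at hl
      | cons a as =>
          cases t with
          | nil => simp [lcpLen]
          | cons b bs =>
              simp only [List.take_succ_cons, List.cons.injEq, lcpLen]
              by_cases hab : a = b
              · rw [if_pos hab]
                simp only [hab, true_and]
                rw [ih as bs (by simpa using Nat.succ_le_succ_iff.mp hl)]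
                omega
              · simp [hab]

theorem adLoopA_eq (s t : List Char) (l : Nat) (c : Int)
    (h1 : lcpLen s t ≤ l) (h2 : l ≤ s.length) :
    adLoopA s t l c = (lcpLen s t, c + ((l : Int) - (lcpLen s t : Int))) := by
  induction l generalizing c with
  | zero =>
      have : lcpLen s t = 0 := Nat.le_zero.mp h1
      simp [adLoopA, this]
  | succ l ih =>
      rw [adLoopA]
      rw [PySem.List.slice_to_natCast, PySem.List.slice_to_natCast]
      by_cases heq : lcpLen s t = l + 1
      · have : s.take (l + 1) = t.take (l + 1) :=
          (take_eq_take_iff s t (l + 1) h2).mpr (by omega)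
        simp [this, heq]
      · have hlt : lcpLen s t ≤ l := by omega
        have hne : s.take (l + 1) ≠ t.take (l + 1) := by
          intro hcontra
          have := (take_eq_take_iff s t (l + 1) h2).mp hcontra
          omega
        rw [if_pos hne, ih (c + 1) hlt (by omega)]
        congr 1
        push_cast
        ring

-- ===== VERDICT (by name: the statement is the Claim_ definition above) =====
theorem appendAndDelete_spec : Claim_equal_appendAndDelete := by
  unfold Claim_equal_appendAndDelete
  intro s t k _
  unfold Spec_appendAndDelete appendAndDelete appendAndDelete_alt
  have h := adLoopA_eq s.toList t.toList s.toList.length 0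
    (lcpLen_le_left s.toList t.toList) (le_refl _)
  simp only [h]
  have ho : (t.toList.length : Int) - (lcpLen s.toList t.toList : Int) +
      (0 + ((s.toList.length : Int) - (lcpLen s.toList t.toList : Int))) =
      (s.toList.length : Int) + (t.toList.length : Int) -
        2 * (lcpLen s.toList t.toList : Int) := by ring
  rw [ho]
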